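-- pv_equiv track=rewrite | github.com/AizzQ/encrypt-via-add-mod-xor-changing-key | PR4.py | encrypt_by_add_mod2
-- ===== SOURCE A (Python) =====
-- def encrypt_by_add_mod2(x, xx):
--     xx = int(xx)
--     ci = [ord(c) for c in x]
--     res = []
--     for ele in ci:
--         aa = (xx + ele)
--         m = 256
--         a1 = int(aa) % m
--         res.append(a1)
--     fi = [chr(c) for c in res]
--     st = "".join(fi)
--     xt = "246"
--     xk = int(xt)
--     x1 = [ord(c) for c in st]
--     res1 = []
--     for el in x1:
--         aa1 = (el + xk)
--         m = 256
--         aa2 = int(aa1) % m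
--         res1.append(aa2)
--     f2 = [chr(cc) for cc in res1]
--     stt = "".join(f2)
--     return stt
-- ===== SOURCE B (Python) =====
-- def encrypt_by_add_mod2(x, xx):
--     xx = int(xx)
--     return "".join(chr((ord(c) + xx + 246) % 256) for c in x)
-- ===== Notes on version B (the rewrite author's own statement) =====
-- stated objective: simpler
-- what changed: Fuses A's two sequential encrypt passes (add xx mod 256, then re-scan the intermediate string adding 246 mod 256) into a single scan computing chr((ord(c)+xx+246)%256), eliminating the intermediate string and the second ord/chr round-trip.
import Mathlib
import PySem

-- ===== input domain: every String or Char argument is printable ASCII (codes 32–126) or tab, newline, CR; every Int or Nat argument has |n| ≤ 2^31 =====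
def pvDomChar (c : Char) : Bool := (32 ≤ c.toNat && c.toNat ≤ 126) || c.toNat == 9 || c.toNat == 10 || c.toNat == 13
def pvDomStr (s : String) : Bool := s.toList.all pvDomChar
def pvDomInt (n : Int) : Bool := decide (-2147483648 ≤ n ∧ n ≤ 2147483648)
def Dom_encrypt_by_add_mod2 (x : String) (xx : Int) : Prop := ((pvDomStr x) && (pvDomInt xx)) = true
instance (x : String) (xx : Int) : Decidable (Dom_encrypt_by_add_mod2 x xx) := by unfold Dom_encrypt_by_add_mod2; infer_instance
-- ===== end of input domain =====

-- ===== PORT A =====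
-- B fuses A's two add-mod-256 passes into one scan (objective: simpler; same O(n) cost).
def encrypt_by_add_mod2 (x : String) (xx : Int) : String :=
  let ci : List Int := x.toList.map (fun c => (c.toNat : Int))
  let res : List Int := ci.foldl (fun acc ele => acc ++ [(xx + ele) % 256]) []
  let fi : List Char := res.map (fun c => Char.ofNat c.toNat)
  let st : String := String.ofList fi
  let xk : Int := 246
  let x1 : List Int := st.toList.map (fun c => (c.toNat : Int))
  let res1 : List Int := x1.foldl (fun acc el => acc ++ [(el + xk) % 256]) []
  let f2 : List Char := res1.map (fun cc => Char.ofNat cc.toNat)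
  String.ofList f2

-- ===== PORT B =====
def encrypt_by_add_mod2_alt (x : String) (xx : Int) : String :=
  String.ofList (x.toList.map (fun c => Char.ofNat (((xx + (c.toNat : Int) + 246) % 256).toNat)))

-- ===== PRECONDITION & SPEC =====
def Spec_encrypt_by_add_mod2 (x : String) (xx : Int) (out : String) : Prop := out = encrypt_by_add_mod2_alt x xx
instance (x : String) (xx : Int) (out : String) : Decidable (Spec_encrypt_by_add_mod2 x xx out) := by unfold Spec_encrypt_by_add_mod2; infer_instance

-- ===== CLAIM (what is proved, stated in full; the proofs are below) =====
def Claim_equal_encrypt_by_add_mod2 : Prop := ∀ (x : String) (xx : Int), Dom_encrypt_by_add_mod2 x xx → Spec_encrypt_by_add_mod2 x xx (encrypt_by_add_mod2 x xx)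

-- ===== LEMMAS AND PROOFS =====
theorem pv_toNat_ofNat_small (n : Nat) (h : n < 256) : (Char.ofNat n).toNat = n := by
  unfold Char.ofNat Char.toNat
  split <;> simp_all [Char.ofNatAux]; omega

theorem pv_foldl_app (f : Int → Int) (l : List Int) (acc : List Int) :
    l.foldl (fun a e => a ++ [f e]) acc = acc ++ l.map f := by
  induction l generalizing acc with
  | nil => simp
  | cons h t ih => simp [ih]

theorem pv_char_step (xx : Int) (c : Char) :
    Char.ofNat ((((Char.ofNat (((xx + (c.toNat : Int)) % 256).toNat)).toNat : Int) + 246) % 256).toNat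
      = Char.ofNat (((xx + (c.toNat : Int) + 246) % 256).toNat) := by
  have h1 : 0 ≤ (xx + (c.toNat : Int)) % 256 := Int.emod_nonneg _ (by norm_num)
  have h2 : (xx + (c.toNat : Int)) % 256 < 256 := Int.emod_lt_of_pos _ (by norm_num)
  rw [pv_toNat_ofNat_small _ (by omega)]
  congr 1
  omega

-- ===== VERDICT (by name: the statement is the Claim_ definition above) =====
theorem encrypt_by_add_mod2_spec : Claim_equal_encrypt_by_add_mod2 := by
  intro x xx _
  show encrypt_by_add_mod2 x xx = encrypt_by_add_mod2_alt x xx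
  simp only [encrypt_by_add_mod2, encrypt_by_add_mod2_alt, pv_foldl_app,
    List.nil_append, List.map_map, String.toList_ofList]
  congr 1
  apply List.map_congr_left
  intro c _
  exact pv_char_step xx c
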